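-- pv_equiv track=rewrite | github.com/NamLeAIT/img2dna-simple | app/main.py | _bits_to_dna
-- ===== SOURCE A (Python) =====
-- def _bits_to_dna(bits: str, order: str = "ACGT") -> str:
--     bits = "".join(ch for ch in bits if ch in "01")
--     lut = {"00": order[0], "01": order[1], "10": order[2], "11": order[3]}
--     if len(bits) % 2 != 0:
--         bits += "0"
--     out = []
--     for i in range(0, len(bits), 2):
--         out.append(lut[bits[i:i+2]])
--     return "".join(out)
-- ===== SOURCE B (Python) =====
-- def _bits_to_dna(bits: str, order: str = "ACGT") -> str:
--     # Single pass: keep at most one pending valid bit; emit a base per pair,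
--     # zero-padding a trailing lone bit. No intermediate filtered string, no dict.
--     out = []
--     pending = None
--     for ch in bits:
--         if ch not in "01":
--             continue
--         if pending is None:
--             pending = ch
--         else:
--             out.append(order[2 * (pending == "1") + (ch == "1")])
--             pending = None
--     if pending is not None:
--         out.append(order[2 * (pending == "1")])
--     return "".join(out)
-- ===== Notes on version B (the rewrite author's own statement) =====
-- stated objective: simpler
-- what changed: Replaces A's two phases (build a filtered bit-string, then index it by 2-char slices through a 4-entry dict) with one pass over the raw input keeping at most one pending bit, emitting order[2*hi+lo] per pair and zero-padding a trailing lone bit.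
import Mathlib
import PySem

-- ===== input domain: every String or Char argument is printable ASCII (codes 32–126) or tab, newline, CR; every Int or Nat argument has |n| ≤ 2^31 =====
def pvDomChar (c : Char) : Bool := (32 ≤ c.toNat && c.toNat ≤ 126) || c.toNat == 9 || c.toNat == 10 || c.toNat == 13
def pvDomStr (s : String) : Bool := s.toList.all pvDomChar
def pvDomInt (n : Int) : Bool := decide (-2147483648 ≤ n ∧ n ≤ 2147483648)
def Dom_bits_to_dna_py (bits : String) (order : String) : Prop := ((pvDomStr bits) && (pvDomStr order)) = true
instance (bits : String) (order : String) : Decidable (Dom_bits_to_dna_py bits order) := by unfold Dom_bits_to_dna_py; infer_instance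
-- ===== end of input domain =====

-- B replaces A's two phases (filter to a bit-string, then dict-lookup of 2-char slices)
-- by one pass holding at most one pending bit (zero-padded if left over at the end)
-- and indexing `order` arithmetically (simpler).


-- ===== PORT A =====
def bits_to_dna_py (bits : String) (order : String) : String :=
  let bitsL := bits.toList.filter (fun ch => ch == '0' || ch == '1')
  match PySem.List.pyGet? order.toList 0, PySem.List.pyGet? order.toList 1,
        PySem.List.pyGet? order.toList 2, PySem.List.pyGet? order.toList 3 with
  | some c0, some c1, some c2, some c3 =>
    let lut : PySem.Dict String String :=
      ((((PySem.Dict.empty).insert "00" (String.ofList [c0])).insert "01" (String.ofList [c1])).insert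
          "10" (String.ofList [c2])).insert "11" (String.ofList [c3])
    let bits2 := if bitsL.length % 2 ≠ 0 then bitsL ++ ['0'] else bitsL
    let out := (PySem.List.pyRange 0 (bits2.length : Int) 2).foldl
      (fun out i => out ++ [lut.getD (String.ofList (PySem.List.slice bits2 (some i) (some (i + 2)))) ""]) []
    PySem.Str.join "" out
  | _, _, _, _ => ""   -- Python raises IndexError here (len(order) < 4): outside Pre_

-- ===== PORT B =====
-- loop body of B's single pass: state = (emitted bases, at most one pending bit)
def pvAltStep (order : String) (st : List Char × Option Char) (ch : Char) : List Char × Option Char :=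
  if !(ch == '0' || ch == '1') then st
  else
    match st.2 with
    | none => (st.1, some ch)
    | some p =>
      match PySem.List.pyGet? order.toList
          (2 * (if p == '1' then 1 else 0) + (if ch == '1' then 1 else 0)) with
      | some c => (st.1 ++ [c], none)
      | none => (st.1, none)   -- Python raises IndexError here: outside Pre_

def bits_to_dna_py_alt (bits : String) (order : String) : String :=
  let st := bits.toList.foldl (pvAltStep order) ([], none)
  let out :=
    match st.2 with
    | none => st.1
    | some p =>
      match PySem.List.pyGet? order.toList (2 * (if p == '1' then 1 else 0)) with
      | some c => st.1 ++ [c]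
      | none => st.1   -- Python raises IndexError here: outside Pre_
  String.ofList out

-- ===== PRECONDITION & SPEC =====
-- Pre_ excludes exactly the inputs on which Python A raises: A always builds its
-- 4-entry lookup table from order[0..3], so any order shorter than 4 raises IndexError.
def Pre_bits_to_dna_py (bits : String) (order : String) : Prop := 4 ≤ order.toList.length
instance (bits : String) (order : String) : Decidable (Pre_bits_to_dna_py bits order) := by unfold Pre_bits_to_dna_py; infer_instance
def pvWitness_bits_to_dna_py : String × String := ("0110x 01", "ACGT")

def Spec_bits_to_dna_py (bits : String) (order : String) (out : String) : Prop := out = bits_to_dna_py_alt bits order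
instance (bits : String) (order : String) (out : String) : Decidable (Spec_bits_to_dna_py bits order out) := by unfold Spec_bits_to_dna_py; infer_instance

-- ===== CLAIM (what is proved, stated in full; the proofs are below) =====
def Claim_equal_bits_to_dna_py : Prop := ∀ (bits : String) (order : String), Dom_bits_to_dna_py bits order → Pre_bits_to_dna_py bits order → Spec_bits_to_dna_py bits order (bits_to_dna_py bits order)

-- ===== LEMMAS AND PROOFS =====

-- the half-open even range [k, n) with step 2
theorem pvRange2_nil (k n : Nat) (h : n ≤ k) : PySem.List.pyRange (k : Int) (n : Int) 2 = [] := by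
  rw [PySem.List.pyRange_of_pos (k : Int) (n : Int) (by norm_num)]
  have hnk : ¬ ((k : Int) < (n : Int)) := by exact_mod_cast not_lt.mpr h
  rw [if_neg hnk]
  simp

theorem pvRange2_cons (k n : Nat) (h : k < n) :
    PySem.List.pyRange (k : Int) (n : Int) 2
      = (k : Int) :: PySem.List.pyRange ((k : Int) + 2) (n : Int) 2 := by
  rw [PySem.List.pyRange_of_pos (k : Int) (n : Int) (by norm_num),
      PySem.List.pyRange_of_pos ((k : Int) + 2) (n : Int) (by norm_num)]
  have hk : (k : Int) < (n : Int) := by exact_mod_cast h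
  rw [if_pos hk]
  by_cases h2 : (k : Int) + 2 < (n : Int)
  · rw [if_pos h2]
    have hcnt : (((n : Int) - ↑k + 2 - 1) / 2).toNat = (((n : Int) - (↑k + 2) + 2 - 1) / 2).toNat + 1 := by
      omega
    rw [hcnt, List.range_succ_eq_map]
    simp only [List.map_cons, List.map_map, Nat.cast_zero, mul_zero, add_zero]
    refine congrArg₂ List.cons rfl ?_
    apply List.map_congr_left
    intro j _
    simp only [Function.comp_apply]
    push_cast
    ring
  · rw [if_neg h2]
    have hcnt : (((n : Int) - ↑k + 2 - 1) / 2).toNat = 1 := by omega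
    rw [hcnt]
    simp

-- A's pair loop, characterised structurally
def pvChunkA (g : List Char → String) : List Char → List String
  | [] => []
  | [a] => [g [a]]
  | a :: b :: rest => g [a, b] :: pvChunkA g rest

-- base emitted for the pair (p, ch) by indexing the order string
def pvBase (ol : List Char) (p ch : Char) : List Char :=
  match PySem.List.pyGet? ol (2 * (if p == '1' then 1 else 0) + (if ch == '1' then 1 else 0)) with
  | some c => [c]
  | none => []

-- B's output, characterised structurally (lone trailing bit padded with '0')
def pvChunkB (ol : List Char) : List Char → List Char
  | [] => []
  | [a] => pvBase ol a '0'
  | a :: b :: rest => pvBase ol a b ++ pvChunkB ol rest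

def pvLut (o0 o1 o2 o3 : Char) : PySem.Dict String String :=
  ((((PySem.Dict.empty).insert "00" (String.ofList [o0])).insert "01" (String.ofList [o1])).insert
      "10" (String.ofList [o2])).insert "11" (String.ofList [o3])

def pvG (o0 o1 o2 o3 : Char) (m : List Char) : String :=
  (pvLut o0 o1 o2 o3).getD (String.ofList m) ""

def pvFinish (order : String) (st : List Char × Option Char) : List Char :=
  st.1 ++ (match st.2 with
    | none => []
    | some p =>
      match PySem.List.pyGet? order.toList (2 * (if p == '1' then 1 else 0)) with
      | some c => [c]
      | none => [])

theorem pvAloop (g : List Char → String) (l0 : List Char) :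
    ∀ (m : List Char) (k : Nat) (acc : List String), l0.drop k = m →
      (PySem.List.pyRange (k : Int) (l0.length : Int) 2).foldl
        (fun out i => out ++ [g (PySem.List.slice l0 (some i) (some (i + 2)))]) acc
        = acc ++ pvChunkA g m
  | [], k, acc, hm => by
      have hk : l0.length ≤ k := List.drop_eq_nil_iff.mp hm
      rw [pvRange2_nil k l0.length hk]
      simp [pvChunkA]
  | [a], k, acc, hm => by
      have hlen : l0.length - k = 1 := by
        have := congrArg List.length hm
        simpa [List.length_drop] using this
      have hk : k < l0.length := by omega
      rw [pvRange2_cons k l0.length hk]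
      simp only [List.foldl_cons]
      rw [show ((k : Int) + 2) = ((k : Int) + ((2 : Nat) : Int)) from by norm_num]
      rw [PySem.List.slice_natCast_add l0 k 2]
      rw [show ((k : Int) + ((2 : Nat) : Int)) = (((k + 2 : Nat)) : Int) from by push_cast; ring]
      rw [pvRange2_nil (k + 2) l0.length (by omega)]
      rw [hm]
      simp [pvChunkA]
  | a :: b :: rest, k, acc, hm => by
      have hk : k < l0.length := by
        have := congrArg List.length hm
        simp [List.length_drop] at this
        omega
      rw [pvRange2_cons k l0.length hk]
      simp only [List.foldl_cons]
      rw [show ((k : Int) + 2) = ((k : Int) + ((2 : Nat) : Int)) from by norm_num]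
      rw [PySem.List.slice_natCast_add l0 k 2]
      rw [show ((k : Int) + ((2 : Nat) : Int)) = (((k + 2 : Nat)) : Int) from by push_cast; ring]
      have hdrop : l0.drop (k + 2) = rest := by
        have h2 : (l0.drop k).drop 2 = rest := by rw [hm]; rfl
        rw [← h2, List.drop_drop]
      rw [pvAloop g l0 rest (k + 2) (acc ++ [g (List.take 2 (l0.drop k))]) hdrop]
      rw [hm]
      simp [pvChunkA, List.append_assoc]

theorem pvFoldFilter (order : String) :
    ∀ (l : List Char) (st : List Char × Option Char),
      l.foldl (pvAltStep order) st
        = (l.filter (fun ch => ch == '0' || ch == '1')).foldl (pvAltStep order) st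
  | [], _ => rfl
  | c :: l, st => by
      rw [List.foldl_cons]
      by_cases hc : (c == '0' || c == '1') = true
      · have hfil : List.filter (fun ch => ch == '0' || ch == '1') (c :: l)
            = c :: List.filter (fun ch => ch == '0' || ch == '1') l := by
          simp [hc]
        rw [hfil, List.foldl_cons, pvFoldFilter order l (pvAltStep order st c)]
      · have hcf : (c == '0' || c == '1') = false := by simpa using hc
        have hfil : List.filter (fun ch => ch == '0' || ch == '1') (c :: l)
            = List.filter (fun ch => ch == '0' || ch == '1') l := by
          simp [hcf]
        have hst : pvAltStep order st c = st := by simp [pvAltStep, hcf]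
        rw [hst, hfil, pvFoldFilter order l st]

theorem pvBloop (order : String) :
    ∀ (l : List Char) (acc : List Char), (∀ c ∈ l, (c == '0' || c == '1') = true) →
      pvFinish order (l.foldl (pvAltStep order) (acc, none))
        = acc ++ pvChunkB order.toList l
  | [], acc, _ => by simp [pvFinish, pvChunkB]
  | [a], acc, h => by
      have ha := h a (by simp)
      simp only [List.foldl_cons, List.foldl_nil]
      rw [show pvAltStep order (acc, none) a = (acc, some a) from by simp [pvAltStep, ha]]
      rcases hg : PySem.List.pyGet? order.toList (2 * (if a == '1' then 1 else 0)) with _ | c <;>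
        simp [pvFinish, pvChunkB, pvBase, show (('0' : Char) == '1') = false from rfl]
  | a :: b :: rest, acc, h => by
      have ha := h a (by simp)
      have hb := h b (by simp)
      have hrest : ∀ c ∈ rest, (c == '0' || c == '1') = true := fun c hc => h c (by simp [hc])
      simp only [List.foldl_cons]
      rw [show pvAltStep order (acc, none) a = (acc, some a) from by simp [pvAltStep, ha]]
      have ha' : a = '0' ∨ a = '1' := by simpa using ha
      have hb' : b = '0' ∨ b = '1' := by simpa using hb
      have key : ∀ (v : Option Char) (bs : List Char),
          (match v with | some c => (bs ++ [c], (none : Option Char)) | none => (bs, none))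
            = (bs ++ (match v with | some c => [c] | none => []), (none : Option Char)) := by
        intro v bs
        cases v <;> simp
      rw [show pvAltStep order (acc, some a) b = (acc ++ pvBase order.toList a b, none) from by
        rcases ha' with rfl | rfl <;> rcases hb' with rfl | rfl
        · exact key (PySem.List.pyGet? order.toList 0) acc
        · exact key (PySem.List.pyGet? order.toList 1) acc
        · exact key (PySem.List.pyGet? order.toList 2) acc
        · exact key (PySem.List.pyGet? order.toList 3) acc]
      rw [pvBloop order rest (acc ++ pvBase order.toList a b) hrest]
      simp [pvChunkB, List.append_assoc]

-- the four pair lookups, evaluated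
theorem pvG00 (o0 o1 o2 o3 : Char) : pvG o0 o1 o2 o3 ['0','0'] = String.ofList [o0] := rfl
theorem pvG01 (o0 o1 o2 o3 : Char) : pvG o0 o1 o2 o3 ['0','1'] = String.ofList [o1] := rfl
theorem pvG10 (o0 o1 o2 o3 : Char) : pvG o0 o1 o2 o3 ['1','0'] = String.ofList [o2] := rfl
theorem pvG11 (o0 o1 o2 o3 : Char) : pvG o0 o1 o2 o3 ['1','1'] = String.ofList [o3] := rfl

theorem pvBase00 (o0 o1 o2 o3 : Char) (t : List Char) :
    pvBase (o0 :: o1 :: o2 :: o3 :: t) '0' '0' = [o0] := by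
  unfold pvBase
  rw [show (2 * (if ('0' : Char) == '1' then 1 else 0)
        + (if ('0' : Char) == '1' then 1 else 0) : Int) = 0 from by decide,
      PySem.List.pyGet?_zero_cons]

theorem pvBase01 (o0 o1 o2 o3 : Char) (t : List Char) :
    pvBase (o0 :: o1 :: o2 :: o3 :: t) '0' '1' = [o1] := by
  unfold pvBase
  rw [show (2 * (if ('0' : Char) == '1' then 1 else 0)
        + (if ('1' : Char) == '1' then 1 else 0) : Int) = (1 : Int) from by decide,
      PySem.List.pyGet?_of_nonneg (h := by norm_num)]
  rfl

theorem pvBase10 (o0 o1 o2 o3 : Char) (t : List Char) :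
    pvBase (o0 :: o1 :: o2 :: o3 :: t) '1' '0' = [o2] := by
  unfold pvBase
  rw [show (2 * (if ('1' : Char) == '1' then 1 else 0)
        + (if ('0' : Char) == '1' then 1 else 0) : Int) = (2 : Int) from by decide,
      PySem.List.pyGet?_of_nonneg (h := by norm_num)]
  rfl

theorem pvBase11 (o0 o1 o2 o3 : Char) (t : List Char) :
    pvBase (o0 :: o1 :: o2 :: o3 :: t) '1' '1' = [o3] := by
  unfold pvBase
  rw [show (2 * (if ('1' : Char) == '1' then 1 else 0)
        + (if ('1' : Char) == '1' then 1 else 0) : Int) = (3 : Int) from by decide,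
      PySem.List.pyGet?_of_nonneg (h := by norm_num)]
  rfl

theorem pvBridge (o0 o1 o2 o3 : Char) (t : List Char) :
    ∀ (l : List Char), (∀ c ∈ l, (c == '0' || c == '1') = true) →
      pvChunkA (pvG o0 o1 o2 o3) (if l.length % 2 ≠ 0 then l ++ ['0'] else l)
        = (pvChunkB (o0 :: o1 :: o2 :: o3 :: t) l).map (fun c => String.ofList [c])
  | [], _ => by simp [pvChunkA, pvChunkB]
  | [a], h => by
      have ha : a = '0' ∨ a = '1' := by simpa using h a (by simp)
      rw [show (if (([a] : List Char).length % 2 ≠ 0) then [a] ++ ['0'] else [a]) = [a, '0'] from by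
        simp]
      rcases ha with rfl | rfl <;>
        simp [pvChunkA, pvChunkB, pvG00, pvG10, pvBase00, pvBase10]
  | a :: b :: rest, h => by
      have ha : a = '0' ∨ a = '1' := by simpa using h a (by simp)
      have hb : b = '0' ∨ b = '1' := by simpa using h b (by simp)
      have hrest : ∀ c ∈ rest, (c == '0' || c == '1') = true := fun c hc => h c (by simp [hc])
      have hrec := pvBridge o0 o1 o2 o3 t rest hrest
      simp only [ne_eq, Nat.mod_two_ne_zero] at hrec
      have hpad : (if ((a :: b :: rest).length % 2 ≠ 0) then (a :: b :: rest) ++ ['0']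
            else (a :: b :: rest))
          = a :: b :: (if rest.length % 2 ≠ 0 then rest ++ ['0'] else rest) := by
        by_cases hr : rest.length % 2 ≠ 0
        · rw [if_pos hr,
              if_pos (show (a :: b :: rest).length % 2 ≠ 0 by simp only [List.length_cons]; omega)]
          rfl
        · rw [if_neg hr,
              if_neg (show ¬ ((a :: b :: rest).length % 2 ≠ 0) by
                simp only [List.length_cons]; omega)]
      rw [hpad]
      rcases ha with rfl | rfl <;> rcases hb with rfl | rfl <;>
        simp [pvChunkA, pvChunkB, pvG00, pvG01, pvG10, pvG11,
          pvBase00, pvBase01, pvBase10, pvBase11, hrec]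

theorem pvJoinSingle (cs : List Char) :
    PySem.Str.join "" (cs.map (fun c => String.ofList [c])) = String.ofList cs := by
  apply String.toList_inj.mp
  rw [PySem.Str.toList_join, List.map_map,
      show (String.toList ∘ fun c => String.ofList [c]) = fun c => [c] from
        funext fun c => String.toList_ofList]
  try rw [show ("" : String).toList = ([] : List Char) from rfl]
  rw [PySem.Chars.join_nil_singletons, String.toList_ofList]

-- ===== VERDICT (by name: the statement is the Claim_ definition above) =====
theorem bits_to_dna_py_spec : Claim_equal_bits_to_dna_py := by
  intro bits order hdom hpre
  unfold Spec_bits_to_dna_py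
  rcases ho : order.toList with _ | ⟨o0, _ | ⟨o1, _ | ⟨o2, _ | ⟨o3, t⟩⟩⟩⟩ <;>
    first
    | (exfalso
       unfold Pre_bits_to_dna_py at hpre
       rw [ho] at hpre
       simp at hpre
       done)
    | skip
  have h0 : PySem.List.pyGet? order.toList 0 = some o0 := by
    rw [ho, PySem.List.pyGet?_zero_cons]
  have h1 : PySem.List.pyGet? order.toList 1 = some o1 := by
    rw [ho, PySem.List.pyGet?_of_nonneg (h := by norm_num)]
    rfl
  have h2 : PySem.List.pyGet? order.toList 2 = some o2 := by
    rw [ho, PySem.List.pyGet?_of_nonneg (h := by norm_num)]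
    rfl
  have h3 : PySem.List.pyGet? order.toList 3 = some o3 := by
    rw [ho, PySem.List.pyGet?_of_nonneg (h := by norm_num)]
    rfl
  have hbitsmem : ∀ c ∈ bits.toList.filter (fun ch => ch == '0' || ch == '1'),
      (c == '0' || c == '1') = true := fun c hc => (List.mem_filter.mp hc).2
  have hA : bits_to_dna_py bits order
      = PySem.Str.join "" ([] ++ pvChunkA (pvG o0 o1 o2 o3)
          (if (bits.toList.filter (fun ch => ch == '0' || ch == '1')).length % 2 ≠ 0
           then bits.toList.filter (fun ch => ch == '0' || ch == '1') ++ ['0']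
           else bits.toList.filter (fun ch => ch == '0' || ch == '1'))) := by
    simp only [bits_to_dna_py, h0, h1, h2, h3]
    exact congrArg (PySem.Str.join "") (pvAloop (pvG o0 o1 o2 o3) _ _ 0 [] List.drop_zero)
  have key2 : ∀ (v : Option Char) (bs : List Char),
      String.ofList (match v with | some c => bs ++ [c] | none => bs)
        = String.ofList (bs ++ (match v with | some c => [c] | none => [])) := by
    intro v bs
    cases v <;> simp
  have hB : bits_to_dna_py_alt bits order
      = String.ofList (pvFinish order (bits.toList.foldl (pvAltStep order) ([], none))) := by
    simp only [bits_to_dna_py_alt, pvFinish]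
    rcases hst : bits.toList.foldl (pvAltStep order) ([], none) with ⟨outl, _ | p⟩
    · simp
    · exact key2 (PySem.List.pyGet? order.toList (2 * (if p == '1' then 1 else 0))) outl
  rw [hA, hB, pvFoldFilter order bits.toList ([], none),
      pvBloop order (bits.toList.filter (fun ch => ch == '0' || ch == '1')) [] hbitsmem, ho,
      pvBridge o0 o1 o2 o3 t (bits.toList.filter (fun ch => ch == '0' || ch == '1')) hbitsmem,
      List.nil_append, List.nil_append, pvJoinSingle]
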